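-- pv_equiv track=rewrite | github.com/PurthaShaariyaar/OA | test/p4.py | validWords
-- ===== SOURCE A (Python) =====
-- def validWords(s):
--   def is_valid_word(word):
--     vowels = set("aeiouAEIOU")
--     consonants = set("bcdfghjklmnpqrstvwxyzBCDFGHJKLMNPQRSTVWXYZ")
--
--     has_alpha = any(char.isalnum() for char in word)
--     has_vowel = any(char in vowels for char in word)
--     has_consonant = any(char in consonants for char in word)
--
--     return has_alpha and has_vowel and has_consonant and len(word) >= 3
--
--   words = s.split()
--   valid_word_count = sum(is_valid_word(word) for word in words)
--   return valid_word_count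
-- ===== SOURCE B (Python) =====
-- def validWords(s):
--     vowels = "aeiouAEIOU"
--     consonants = "bcdfghjklmnpqrstvwxyzBCDFGHJKLMNPQRSTVWXYZ"
--     count = 0
--     for word in s.split():
--         saw_alnum = saw_vowel = saw_consonant = False
--         for ch in word:
--             if ch.isalnum():
--                 saw_alnum = True
--             if ch in vowels:
--                 saw_vowel = True
--             if ch in consonants:
--                 saw_consonant = True
--         if saw_alnum and saw_vowel and saw_consonant and len(word) >= 3:
--             count += 1
--     return count
-- ===== Notes on version B (the rewrite author's own statement) =====
-- stated objective: alternative
-- what changed: Each word is scanned once with three boolean flags updated in a single character loop and a running counter, instead of three separate any() comprehension passes per word plus a sum over a generator.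
import Mathlib
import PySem

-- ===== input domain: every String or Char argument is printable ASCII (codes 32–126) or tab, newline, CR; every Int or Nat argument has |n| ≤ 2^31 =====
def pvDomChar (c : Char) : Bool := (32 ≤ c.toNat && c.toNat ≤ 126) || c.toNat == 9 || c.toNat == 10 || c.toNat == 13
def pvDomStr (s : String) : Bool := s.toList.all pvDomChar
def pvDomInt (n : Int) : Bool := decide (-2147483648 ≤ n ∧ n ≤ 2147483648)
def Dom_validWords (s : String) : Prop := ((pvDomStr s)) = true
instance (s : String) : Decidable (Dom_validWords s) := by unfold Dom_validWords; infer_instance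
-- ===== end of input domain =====

-- B replaces A's three any() scans per word by one single-pass flag loop with a running counter; same values, no speed claim.

-- ===== PORT A =====
def pvVowelsA : List Char := "aeiouAEIOU".toList
def pvConsonantsA : List Char := "bcdfghjklmnpqrstvwxyzBCDFGHJKLMNPQRSTVWXYZ".toList

def isValidWordA (word : List Char) : Bool :=
  let has_alpha := word.any (fun c => PySem.Chars.isalnum c)
  let has_vowel := word.any (fun c => pvVowelsA.contains c)
  let has_consonant := word.any (fun c => pvConsonantsA.contains c)
  has_alpha && has_vowel && has_consonant && decide (word.length ≥ 3)

def validWords (s : String) : Int :=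
  (PySem.Str.split₀ s).foldl (fun acc w => acc + (if isValidWordA w.toList then 1 else 0)) 0

-- ===== PORT B =====
def pvVowelsB : List Char := "aeiouAEIOU".toList
def pvConsonantsB : List Char := "bcdfghjklmnpqrstvwxyzBCDFGHJKLMNPQRSTVWXYZ".toList

-- the single-pass flag loop over the word's characters
def isValidWordB (word : List Char) : Bool :=
  let fl := word.foldl
    (fun (fl : Bool × Bool × Bool) c =>
      (fl.1 || PySem.Chars.isalnum c,
       fl.2.1 || pvVowelsB.contains c,
       fl.2.2 || pvConsonantsB.contains c))
    (false, false, false)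
  fl.1 && fl.2.1 && fl.2.2 && decide (word.length ≥ 3)

def validWords_alt (s : String) : Int :=
  (PySem.Str.split₀ s).foldl (fun acc w => if isValidWordB w.toList then acc + 1 else acc) 0

-- ===== PRECONDITION & SPEC =====
def Spec_validWords (s : String) (out : Int) : Prop := out = validWords_alt s
instance (s : String) (out : Int) : Decidable (Spec_validWords s out) := by unfold Spec_validWords; infer_instance

-- ===== CLAIM (what is proved, stated in full; the proofs are below) =====
def Claim_equal_validWords : Prop := ∀ (s : String), Dom_validWords s → Spec_validWords s (validWords s)

-- ===== LEMMAS AND PROOFS =====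

-- the flag fold computes the disjunction of the three any-scans
theorem flags_eq (word : List Char) (a v c : Bool) :
    word.foldl
      (fun (fl : Bool × Bool × Bool) ch =>
        (fl.1 || PySem.Chars.isalnum ch,
         fl.2.1 || pvVowelsB.contains ch,
         fl.2.2 || pvConsonantsB.contains ch))
      (a, v, c)
    = (a || word.any (fun ch => PySem.Chars.isalnum ch),
       v || word.any (fun ch => pvVowelsB.contains ch),
       c || word.any (fun ch => pvConsonantsB.contains ch)) := by
  induction word generalizing a v c with
  | nil => simp
  | cons hd tl ih =>
    simp only [List.foldl_cons, List.any_cons]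
    rw [ih]
    simp [Bool.or_assoc]

theorem isValidWord_eq (word : List Char) : isValidWordA word = isValidWordB word := by
  simp only [isValidWordA, isValidWordB]
  rw [flags_eq]
  simp [pvVowelsA, pvVowelsB, pvConsonantsA, pvConsonantsB]

theorem fold_eq (ws : List String) (acc : Int) :
    ws.foldl (fun acc w => acc + (if isValidWordA w.toList then 1 else 0)) acc
    = ws.foldl (fun acc w => if isValidWordB w.toList then acc + 1 else acc) acc := by
  induction ws generalizing acc with
  | nil => rfl
  | cons hd tl ih =>
    simp only [List.foldl_cons]
    rw [ih, isValidWord_eq]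
    split_ifs <;> simp

-- ===== VERDICT (by name: the statement is the Claim_ definition above) =====
theorem validWords_spec : Claim_equal_validWords := by
  intro s _
  unfold Spec_validWords validWords validWords_alt
  exact fold_eq _ 0
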